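-- pv_equiv track=rewrite | github.com/Teravla/Coding_Signal | source/code/Bipolar.py | bipolar
-- ===== SOURCE A (Python) =====
-- def bipolar(bits):
--     """
--     Génère un signal bipolaire à partir d'une chaîne de bits.
--
--     :param bits: Liste de bits (0s et 1s) à coder.
--     :return: Liste de niveaux de tension pour le signal bipolaire.
--
--     **Exemple:**
--
--     >>> bipolar([0, 1, 0, 1, 0])
--     [0, 1, 0, -1, 0]
--     """
--     bipolar_code = []
--     last_one = 1
--     for bit in bits:
--         if bit == 1:
--             bipolar_code.append(last_one)
--             last_one = -last_one
--         else:
--             bipolar_code.append(0)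
--     return bipolar_code
-- ===== SOURCE B (Python) =====
-- def bipolar(bits):
--     bits = list(bits)
--     ones = [i for i, b in enumerate(bits) if b == 1]
--     res = [0] * len(bits)
--     for j, i in enumerate(ones):
--         res[i] = 1 if j % 2 == 0 else -1
--     return res
-- ===== Notes on version B (the rewrite author's own statement) =====
-- stated objective: alternative
-- what changed: Replaces the sequential sign-toggle loop with a two-pass index-then-assign shape: collect the indices of 1-bits, allocate an all-zero result, then write +1/-1 at those indices by rank parity.
import Mathlib
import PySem

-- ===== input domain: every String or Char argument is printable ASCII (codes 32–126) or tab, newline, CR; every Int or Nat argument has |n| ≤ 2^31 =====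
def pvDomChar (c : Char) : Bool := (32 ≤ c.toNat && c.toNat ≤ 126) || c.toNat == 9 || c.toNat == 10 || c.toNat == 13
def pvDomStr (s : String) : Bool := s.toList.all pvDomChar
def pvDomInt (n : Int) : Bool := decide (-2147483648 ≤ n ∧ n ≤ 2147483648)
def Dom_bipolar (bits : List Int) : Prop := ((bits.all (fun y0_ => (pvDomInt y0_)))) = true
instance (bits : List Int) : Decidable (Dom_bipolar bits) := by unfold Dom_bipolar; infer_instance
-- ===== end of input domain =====

-- B rewrites A's sequential sign-toggle loop as a two-pass index-then-assign scheme
-- (collect 1-bit indices, then write ±1 by rank parity into an all-zero list); same cost, different decomposition.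

-- ===== PORT A =====
-- A's loop: accumulate the output list and the 'last_one' toggle.
def bipolar (bits : List Int) : List Int :=
  (bits.foldl
    (fun (st : List Int × Int) bit =>
      if bit == 1 then (st.1 ++ [st.2], -st.2) else (st.1 ++ [(0 : Int)], st.2))
    ([], 1)).1

-- ===== PORT B =====
-- ones = [i for i, b in enumerate(bits) if b == 1]
-- res = [0] * len(bits); for j, i in enumerate(ones): res[i] = 1 if j % 2 == 0 else -1
def bipolar_alt (bits : List Int) : List Int :=
  let ones : List Int :=
    ((PySem.List.enumerate bits 0).filter (fun p => p.2 == 1)).map (fun p => p.1)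
  let res : List Int := List.replicate bits.length 0
  (PySem.List.enumerate ones 0).foldl
    (fun r p => PySem.List.pySetD r p.2 (if PySem.Int.mod p.1 2 == 0 then 1 else -1))
    res

-- ===== PRECONDITION & SPEC =====
def Spec_bipolar (bits : List Int) (out : List Int) : Prop := out = bipolar_alt bits
instance (bits : List Int) (out : List Int) : Decidable (Spec_bipolar bits out) := by unfold Spec_bipolar; infer_instance

-- ===== CLAIM (what is proved, stated in full; the proofs are below) =====
def Claim_equal_bipolar : Prop := ∀ (bits : List Int), Dom_bipolar bits → Spec_bipolar bits (bipolar bits)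

-- ===== LEMMAS AND PROOFS =====

-- the output of A's loop, as a structural recursion
def goA : List Int → Int → List Int
  | [], _ => []
  | b :: bs, last => if b == 1 then last :: goA bs (-last) else 0 :: goA bs last

-- A's foldl equals goA
theorem bipolar_foldl_eq (bits : List Int) (acc : List Int) (last : Int) :
    (bits.foldl
      (fun (st : List Int × Int) bit =>
        if bit == 1 then (st.1 ++ [st.2], -st.2) else (st.1 ++ [(0 : Int)], st.2))
      (acc, last)).1 = acc ++ goA bits last := by
  induction bits generalizing acc last with
  | nil => simp [goA]
  | cons b bs ih =>
    simp only [List.foldl_cons]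
    by_cases hb : b = 1
    · rw [if_pos (by simp [hb]), ih]
      simp [goA, hb]
    · rw [if_neg (by simp [hb]), ih]
      simp [goA, hb]

-- the ones-index list of B, and its assignment loop, as named helpers
def onesOf (bits : List Int) : List Int :=
  ((PySem.List.enumerate bits 0).filter (fun p => p.2 == 1)).map (fun p => p.1)

def assignF (ones : List Int) (j0 : Int) (res : List Int) : List Int :=
  (PySem.List.enumerate ones j0).foldl
    (fun r p => PySem.List.pySetD r p.2 (if PySem.Int.mod p.1 2 == 0 then 1 else -1))
    res

theorem bipolar_alt_eq (bits : List Int) :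
    bipolar_alt bits = assignF (onesOf bits) 0 (List.replicate bits.length 0) := rfl

-- enumerate shifts
theorem enumerate_shift {α : Type} (xs : List α) (s t : Int) :
    PySem.List.enumerate xs (s + t) =
      (PySem.List.enumerate xs s).map (fun p => (p.1 + t, p.2)) := by
  induction xs generalizing s with
  | nil => simp [PySem.List.enumerate_nil]
  | cons x xs ih =>
    simp [PySem.List.enumerate_cons, ← ih]
    ring_nf

theorem shift_filter_fst (l : List (Int × Int)) :
    ((l.map (fun p => (p.1 + 1, p.2))).filter (fun p => p.2 == 1)).map (fun p => p.1)
      = ((l.filter (fun p => p.2 == 1)).map (fun p => p.1)).map (fun i => i + 1) := by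
  induction l with
  | nil => simp
  | cons p l ih =>
    by_cases hp : p.2 = 1 <;> simp [hp, ih]

theorem onesOf_cons (b : Int) (bs : List Int) :
    onesOf (b :: bs) =
      (if b = 1 then [(0 : Int)] else []) ++ (onesOf bs).map (fun i => i + 1) := by
  unfold onesOf
  rw [PySem.List.enumerate_cons]
  rw [show (0 : Int) + 1 = 0 + 1 from rfl, enumerate_shift bs 0 1]
  by_cases hb : b = 1 <;> simp [hb, shift_filter_fst]

theorem onesOf_nonneg (bits : List Int) : ∀ i ∈ onesOf bits, 0 ≤ i := by
  intro i hi
  unfold onesOf at hi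
  simp only [List.mem_map, List.mem_filter] at hi
  obtain ⟨p, ⟨hp, _⟩, rfl⟩ := hi
  rw [PySem.List.mem_enumerate_iff] at hp
  obtain ⟨k, hk, rfl⟩ := hp
  simp

theorem assignF_nil (j0 : Int) (res : List Int) : assignF [] j0 res = res := by
  simp [assignF, PySem.List.enumerate_nil]

theorem assignF_cons (i : Int) (ones : List Int) (j0 : Int) (res : List Int) :
    assignF (i :: ones) j0 res =
      assignF ones (j0 + 1)
        (PySem.List.pySetD res i (if PySem.Int.mod j0 2 == 0 then 1 else -1)) := by
  simp [assignF, PySem.List.enumerate_cons]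

-- pushing the assignment loop through a shifted index list
theorem assignF_shift (ones : List Int) (j0 : Int) (x : Int) (res : List Int)
    (hpos : ∀ i ∈ ones, 0 ≤ i) :
    assignF (ones.map (fun i => i + 1)) j0 (x :: res) = x :: assignF ones j0 res := by
  induction ones generalizing j0 x res with
  | nil => simp [assignF_nil]
  | cons i ones ih =>
    have hi : 0 ≤ i := hpos i (by simp)
    have hset : PySem.List.pySetD (x :: res) (i + 1)
        (if PySem.Int.mod j0 2 == 0 then (1:Int) else -1) =
        x :: PySem.List.pySetD res i (if PySem.Int.mod j0 2 == 0 then 1 else -1) := by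
      rw [PySem.List.pySetD_of_nonneg _ _ (by omega),
          PySem.List.pySetD_of_nonneg _ _ hi]
      have : (i + 1).toNat = i.toNat + 1 := by omega
      simp [this]
    rw [List.map_cons, assignF_cons, hset, assignF_cons,
        ih _ _ _ (fun j hj => hpos j (by simp [hj]))]

def sgn (j : Int) : Int := if PySem.Int.mod j 2 == 0 then 1 else -1

theorem sgn_succ (j : Int) : sgn (j + 1) = - sgn j := by
  unfold sgn
  rw [PySem.Int.mod_eq_emod_of_pos (by omega : (0:Int) < 2),
      PySem.Int.mod_eq_emod_of_pos (by omega : (0:Int) < 2)]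
  rcases Int.emod_two_eq_zero_or_one j with h | h
  · have h2 : (j + 1) % 2 = 1 := by omega
    simp [h, h2]
  · have h2 : (j + 1) % 2 = 0 := by omega
    simp [h, h2]

theorem assignF_onesOf (bits : List Int) (j0 : Int) :
    assignF (onesOf bits) j0 (List.replicate bits.length 0) = goA bits (sgn j0) := by
  induction bits generalizing j0 with
  | nil => simp [onesOf, PySem.List.enumerate_nil, assignF_nil, goA]
  | cons b bs ih =>
    by_cases hb : b = 1
    · rw [onesOf_cons, if_pos hb]
      simp only [List.singleton_append, List.length_cons, List.replicate_succ]
      rw [assignF_cons]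
      have hset : PySem.List.pySetD ((0:Int) :: List.replicate bs.length 0) 0
          (if PySem.Int.mod j0 2 == 0 then (1:Int) else -1) =
          sgn j0 :: List.replicate bs.length 0 := by
        rw [PySem.List.pySetD_of_nonneg _ _ (by omega)]
        simp [sgn]
      rw [hset, assignF_shift _ _ _ _ (onesOf_nonneg bs), ih, sgn_succ]
      simp [goA, hb]
    · rw [onesOf_cons, if_neg hb]
      simp only [List.nil_append, List.length_cons, List.replicate_succ]
      rw [assignF_shift _ _ _ _ (onesOf_nonneg bs), ih]
      simp [goA, hb]

-- ===== VERDICT (by name: the statement is the Claim_ definition above) =====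
theorem bipolar_spec : Claim_equal_bipolar := by
  intro bits _
  unfold Spec_bipolar
  rw [bipolar_alt_eq, assignF_onesOf]
  show bipolar bits = goA bits (sgn 0)
  have : sgn 0 = 1 := by decide
  rw [this]
  unfold bipolar
  simpa using bipolar_foldl_eq bits [] 1
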